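-- pv_equiv track=rewrite | github.com/markchweya/local-business-chatbot | app.py | safe_index
-- ===== SOURCE A (Python) =====
-- def safe_index(options, value, fallback_value=None):
--     value_norm = "" if value is None else str(value).strip().upper()
--     options_norm = [str(o).strip().upper() for o in options]
--     if value_norm in options_norm:
--         return options_norm.index(value_norm)
--     if fallback_value is not None:
--         fb = str(fallback_value).strip().upper()
--         if fb in options_norm:
--             return options_norm.index(fb)
--     return 0
-- ===== SOURCE B (Python) =====
-- def safe_index(options, value, fallback_value=None):
--     value_norm = "" if value is None else str(value).strip().upper()
--     fb = None if fallback_value is None else str(fallback_value).strip().upper()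
--     fb_idx = None
--     for i, o in enumerate(options):
--         o_norm = str(o).strip().upper()
--         if o_norm == value_norm:
--             return i
--         if fb is not None and fb_idx is None and o_norm == fb:
--             fb_idx = i
--     return fb_idx if fb_idx is not None else 0
-- ===== Notes on version B (the rewrite author's own statement) =====
-- stated objective: alternative
-- what changed: Replaces A's build-normalized-list then membership tests plus .index rescans (up to four passes over the normalized data) with a single enumerate pass that normalizes each option once, returns immediately on a value match and records the first fallback match in an accumulator.
import Mathlib
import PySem

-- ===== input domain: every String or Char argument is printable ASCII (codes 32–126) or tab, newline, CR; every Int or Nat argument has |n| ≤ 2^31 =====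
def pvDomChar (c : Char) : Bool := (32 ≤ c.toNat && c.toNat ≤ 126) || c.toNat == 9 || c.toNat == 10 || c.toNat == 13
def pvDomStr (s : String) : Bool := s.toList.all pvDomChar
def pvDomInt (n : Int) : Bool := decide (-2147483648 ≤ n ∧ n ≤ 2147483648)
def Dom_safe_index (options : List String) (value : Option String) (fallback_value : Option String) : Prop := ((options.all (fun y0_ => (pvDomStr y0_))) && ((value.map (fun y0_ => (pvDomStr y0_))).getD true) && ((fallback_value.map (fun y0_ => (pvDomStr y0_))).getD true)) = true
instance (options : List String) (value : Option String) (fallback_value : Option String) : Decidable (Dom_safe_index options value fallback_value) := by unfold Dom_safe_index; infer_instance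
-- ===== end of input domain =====

-- B: single pass over the raw options with a fallback-index accumulator, instead of A's
-- normalized-list build plus membership tests plus .index rescans (same cost, one traversal).
-- ===== PORT A =====
-- str(o).strip().upper() (str(·) is identity on str)
def pvNorm (s : String) : String := PySem.Str.upper (PySem.Str.strip s)

def safe_index (options : List String) (value : Option String) (fallback_value : Option String) : Int :=
  let value_norm := match value with | none => "" | some v => pvNorm v
  let options_norm := options.map (fun o => pvNorm o)
  if value_norm ∈ options_norm then
    ((PySem.List.index? options_norm value_norm).getD 0 : Nat)
  else
    match fallback_value with
    | some fv =>
        let fb := pvNorm fv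
        if fb ∈ options_norm then ((PySem.List.index? options_norm fb).getD 0 : Nat)
        else 0
    | none => 0

-- ===== PORT B =====
-- the for-loop of Source B: i is the enumerate counter, fbIdx the recorded fallback index
def pvFind (value_norm : String) (fb : Option String) : List String → Nat → Option Nat → Int
  | [], _, fbIdx => match fbIdx with | some j => (j : Int) | none => 0
  | o :: rest, i, fbIdx =>
      let o_norm := pvNorm o
      if o_norm = value_norm then (i : Int)
      else
        pvFind value_norm fb rest (i + 1)
          (match fbIdx with
           | some j => some j
           | none =>
             match fb with
             | none => none
             | some f => if o_norm = f then some i else none)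

def safe_index_alt (options : List String) (value : Option String) (fallback_value : Option String) : Int :=
  let value_norm := match value with | none => "" | some v => pvNorm v
  let fb := fallback_value.map (fun f => pvNorm f)
  pvFind value_norm fb options 0 none

-- ===== PRECONDITION & SPEC =====
def Spec_safe_index (options : List String) (value : Option String) (fallback_value : Option String) (out : Int) : Prop := out = safe_index_alt options value fallback_value
instance (options : List String) (value : Option String) (fallback_value : Option String) (out : Int) : Decidable (Spec_safe_index options value fallback_value out) := by unfold Spec_safe_index; infer_instance

-- ===== CLAIM (what is proved, stated in full; the proofs are below) =====
def Claim_equal_safe_index : Prop := ∀ (options : List String) (value : Option String) (fallback_value : Option String), Dom_safe_index options value fallback_value → Spec_safe_index options value fallback_value (safe_index options value fallback_value)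

-- ===== LEMMAS AND PROOFS =====

-- ===== VERDICT (by name: the statement is the Claim_ definition above) =====
-- loop invariant: pvFind returns the first value match (offset by i), else the recorded/first
-- fallback match, else 0
theorem pvFind_eq (vn : String) (fb : Option String) (l : List String) (i : Nat) (fbIdx : Option Nat) :
    pvFind vn fb l i fbIdx =
      match PySem.List.index? (l.map pvNorm) vn with
      | some k => ((i + k : Nat) : Int)
      | none =>
        match fbIdx with
        | some j => (j : Int)
        | none =>
          match fb with
          | none => 0
          | some f =>
            match PySem.List.index? (l.map pvNorm) f with
            | some k => ((i + k : Nat) : Int)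
            | none => 0 := by
  induction l generalizing i fbIdx with
  | nil =>
    cases fbIdx <;> cases fb <;> rfl
  | cons o rest ih =>
    by_cases hv : pvNorm o = vn
    · rw [pvFind.eq_def]
      simp only [hv, List.map_cons, PySem.List.index?_cons_self]
      simp
    · rw [pvFind.eq_def]
      simp only [hv, if_false]
      rw [ih, List.map_cons, PySem.List.index?_cons_of_ne _ hv]
      cases hvk : PySem.List.index? (rest.map pvNorm) vn with
      | some k => simp only [Option.map_some]; push_cast; ring_nf
      | none =>
        simp only [Option.map_none]
        cases fbIdx with
        | some j => rfl
        | none =>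
          cases fb with
          | none => rfl
          | some f =>
            by_cases hf : pvNorm o = f
            · subst hf
              have h2 : PySem.List.index? (pvNorm o :: rest.map pvNorm) (pvNorm o) = some 0 :=
                PySem.List.index?_cons_self _ _
              rw [PySem.List.index?_eq_idxOf?] at h2
              simp [h2]
            · have h2 := PySem.List.index?_cons_of_ne (x := pvNorm o) (v := f) (rest.map pvNorm) hf
              cases hfk : PySem.List.index? (rest.map pvNorm) f with
              | some k =>
                rw [hfk] at h2
                rw [PySem.List.index?_eq_idxOf?] at h2 hfk
                simp [h2, hfk, hf]; ring
              | none =>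
                rw [hfk] at h2
                rw [PySem.List.index?_eq_idxOf?] at h2 hfk
                simp [h2, hfk, hf]

theorem safe_index_spec : Claim_equal_safe_index := by
  intro options value fallback_value _
  unfold Spec_safe_index safe_index safe_index_alt
  rw [pvFind_eq]
  set vn := match value with | none => "" | some v => pvNorm v with hvn
  have heta : options.map (fun o => pvNorm o) = options.map pvNorm := rfl
  by_cases hv : vn ∈ options.map pvNorm
  · cases hk : PySem.List.index? (options.map pvNorm) vn with
    | none =>
      have := (PySem.List.index?_isSome_iff (options.map pvNorm) vn).mpr hv
      rw [hk] at this; simp at this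
    | some k => simp only [heta, hv, if_pos, hk, Option.getD_some]; simp
  · have hk : PySem.List.index? (options.map pvNorm) vn = none := by
      cases hk : PySem.List.index? (options.map pvNorm) vn with
      | none => rfl
      | some k =>
        exact absurd ((PySem.List.index?_isSome_iff (options.map pvNorm) vn).mp
          (by rw [hk]; rfl)) hv
    simp only [heta, hv, if_false, hk]
    cases fallback_value with
    | none => rfl
    | some fv =>
      by_cases hf : pvNorm fv ∈ options.map pvNorm
      · cases hk2 : PySem.List.index? (options.map pvNorm) (pvNorm fv) with
        | none =>
          have := (PySem.List.index?_isSome_iff (options.map pvNorm) (pvNorm fv)).mpr hf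
          rw [hk2] at this; simp at this
        | some k => simp only [hf, if_pos, hk2, Option.getD_some, Option.map_some]; simp
      · have hk2 : PySem.List.index? (options.map pvNorm) (pvNorm fv) = none := by
          cases hk2 : PySem.List.index? (options.map pvNorm) (pvNorm fv) with
          | none => rfl
          | some k =>
            exact absurd ((PySem.List.index?_isSome_iff (options.map pvNorm) (pvNorm fv)).mp
              (by rw [hk2]; rfl)) hf
        simp only [hf, if_false, hk2, Option.map_some]
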